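-- pv_equiv track=rewrite | github.com/carlosaccp/mathstuff | decryptor.py | reversemod
-- ===== SOURCE A (Python) =====
-- def reversemod(num):
--     posmod = num
--     negmod = num
--     while (posmod % 15 != 0):
--         posmod += 26
--     while (negmod % 15 != 0):
--         negmod -= 26
--     if abs(negmod) < abs(posmod):
--         finalmod = negmod
--     else:
--         finalmod = posmod
--     return finalmod
-- ===== SOURCE B (Python) =====
-- def reversemod(num):
--     k = (-num * 11) % 15
--     j = (num * 11) % 15
--     posmod = num + 26 * k
--     negmod = num - 26 * j
--     return negmod if abs(negmod) < abs(posmod) else posmod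
-- ===== Notes on version B (the rewrite author's own statement) =====
-- stated objective: simpler
-- what changed: Replaces both step-by-twenty-six while-loops with closed-form step counts obtained from the modular inverse of the step size modulo the target divisor, turning the search into straight-line modular arithmetic.
import Mathlib
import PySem

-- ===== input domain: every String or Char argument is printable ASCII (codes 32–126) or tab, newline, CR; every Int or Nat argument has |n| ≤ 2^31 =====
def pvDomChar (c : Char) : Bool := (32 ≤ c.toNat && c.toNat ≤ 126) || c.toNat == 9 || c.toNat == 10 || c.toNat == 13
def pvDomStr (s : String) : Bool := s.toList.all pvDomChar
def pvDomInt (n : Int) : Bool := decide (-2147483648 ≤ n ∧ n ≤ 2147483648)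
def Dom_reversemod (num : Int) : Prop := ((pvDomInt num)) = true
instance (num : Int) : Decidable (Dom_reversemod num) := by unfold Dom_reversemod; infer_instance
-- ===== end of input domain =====

-- B replaces A's two step-by-26 while-loops with closed-form step counts via the inverse of 26 modulo 15; same return value everywhere.

-- ===== PORT A =====
-- while (posmod % 15 != 0): posmod += 26
-- The fuel argument only bounds the recursion (the loop needs at most 14 iterations,
-- as pvPosLoop_closed below proves); each step is the Python loop body verbatim.
def pvPosLoop : Nat → Int → Int
  | 0, p => p
  | fuel + 1, p => if p % 15 ≠ 0 then pvPosLoop fuel (p + 26) else p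

-- while (negmod % 15 != 0): negmod -= 26
def pvNegLoop : Nat → Int → Int
  | 0, p => p
  | fuel + 1, p => if p % 15 ≠ 0 then pvNegLoop fuel (p - 26) else p

def reversemod (num : Int) : Int :=
  let posmod := pvPosLoop 15 num
  let negmod := pvNegLoop 15 num
  if |negmod| < |posmod| then negmod else posmod

-- ===== PORT B =====
def reversemod_alt (num : Int) : Int :=
  let k := (-num * 11) % 15
  let j := (num * 11) % 15
  let posmod := num + 26 * k
  let negmod := num - 26 * j
  if |negmod| < |posmod| then negmod else posmod

-- ===== PRECONDITION & SPEC =====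
def Spec_reversemod (num : Int) (out : Int) : Prop := out = reversemod_alt num
instance (num : Int) (out : Int) : Decidable (Spec_reversemod num out) := by unfold Spec_reversemod; infer_instance

-- ===== CLAIM (what is proved, stated in full; the proofs are below) =====
def Claim_equal_reversemod : Prop := ∀ (num : Int), Dom_reversemod num → Spec_reversemod num (reversemod num)

-- ===== LEMMAS AND PROOFS =====
theorem pvStepPos (q r : Int) (h1 : 1 ≤ r) (h2 : r ≤ 14) :
    (-(15 * q + r + 26) * 11) % 15 = (-(15 * q + r) * 11) % 15 - 1 := by
  interval_cases r <;> omega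

theorem pvStepNeg (q r : Int) (h1 : 1 ≤ r) (h2 : r ≤ 14) :
    ((15 * q + r - 26) * 11) % 15 = ((15 * q + r) * 11) % 15 - 1 := by
  interval_cases r <;> omega

theorem pvPosLoop_closed (fuel : Nat) (p : Int) (hf : (-p * 11) % 15 < fuel) :
    pvPosLoop fuel p = p + 26 * ((-p * 11) % 15) := by
  induction fuel generalizing p with
  | zero => omega
  | succ fuel ih =>
      by_cases h : p % 15 ≠ 0
      · obtain ⟨q, r, h1, h2, rfl⟩ : ∃ q r, 1 ≤ r ∧ r ≤ 14 ∧ p = 15 * q + r :=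
          ⟨p / 15, p % 15, by omega, by omega, by omega⟩
        have hk := pvStepPos q r h1 h2
        rw [pvPosLoop, if_pos h, ih _ (by omega)]
        omega
      · rw [pvPosLoop, if_neg h]
        obtain ⟨q, rfl⟩ : ∃ q, p = 15 * q := ⟨p / 15, by omega⟩
        omega

theorem pvNegLoop_closed (fuel : Nat) (p : Int) (hf : (p * 11) % 15 < fuel) :
    pvNegLoop fuel p = p - 26 * ((p * 11) % 15) := by
  induction fuel generalizing p with
  | zero => omega
  | succ fuel ih =>
      by_cases h : p % 15 ≠ 0
      · obtain ⟨q, r, h1, h2, rfl⟩ : ∃ q r, 1 ≤ r ∧ r ≤ 14 ∧ p = 15 * q + r :=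
          ⟨p / 15, p % 15, by omega, by omega, by omega⟩
        have hk := pvStepNeg q r h1 h2
        rw [pvNegLoop, if_pos h, ih _ (by omega)]
        omega
      · rw [pvNegLoop, if_neg h]
        obtain ⟨q, rfl⟩ : ∃ q, p = 15 * q := ⟨p / 15, by omega⟩
        omega

-- ===== VERDICT (by name: the statement is the Claim_ definition above) =====
theorem reversemod_spec : Claim_equal_reversemod := by
  intro num _
  unfold Spec_reversemod reversemod reversemod_alt
  rw [pvPosLoop_closed 15 num (by omega), pvNegLoop_closed 15 num (by omega)]
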